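-- pv_equiv track=rewrite | github.com/RybakovaIE/BSUIR | lois/lab1.py | correction_check
-- ===== SOURCE A (Python) =====
-- def correction_check(line):
--     operations = ['/\\','\\/','->','~']
--     simplified = unify_letters(line)
--     if simplified == None:
--         return False
--     simplified = no_negotions(simplified)
--     for i in range(len(operations)):
--         simplified = simplified.replace(operations[i], '/\\')
--     while find_binary(simplified, '/\\'):
--         simplified = simplified.replace('(A/\\A)', 'A')
--     return simplified == 'A'
--
-- def no_negotions(line):
--     i = 0
--     while i < len(line):
--         if line[i] == '(':
--             if line[i+1:i+4] == '!A)':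
--                 line = line[:i] + 'A' + line[i+4:]
--         i += 1
--     return line
--
-- def find_binary(line, op):
--     for i in range(0, len(line)-5):
--         if line[i:i+6] == '(A' + op + 'A)':
--             return True
--     return False
--
-- def unify_letters(line):
--     i = 0
--     while i < len(line)-1:
--         if line[i].isalpha and line[i].isupper():
--             line = line[:i] + 'A' + line[i+1:]
--         i += 1
--     return line
-- ===== SOURCE B (Python) =====
-- def correction_check(line):
--     s = ''.join('A' if c.isupper() else c for c in line)
--     s = s.replace('(!A)', 'A')
--     for op in ('\\/', '->', '~'):
--         s = s.replace(op, '/\\')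
--     stack = []
--     for c in s:
--         stack.append(c)
--         if c == ')' and stack[-6:] == ['(', 'A', '/', '\\', 'A', ')']:
--             del stack[-6:]
--             stack.append('A')
--     return stack == ['A']
-- ===== Notes on version B (the rewrite author's own statement) =====
-- stated objective: faster
-- what changed: B replaces A's quadratic index-and-rebuild scans (unify_letters, no_negotions) with one map plus one str.replace, and replaces A's replace-to-fixpoint reduction loop with a single left-to-right stack pass that collapses each fully reduced binary node when its closing parenthesis arrives.
-- intended difference: On a line that is a single uppercase letter other than 'A' (e.g. 'B'), A returns False because its unify_letters loop (while i < len(line)-1) never rewrites the last character, while B returns True, the intended answer since such a line is already a single atom. — e.g. on correction_check("B"): A returns false, B returns true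
import Mathlib
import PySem

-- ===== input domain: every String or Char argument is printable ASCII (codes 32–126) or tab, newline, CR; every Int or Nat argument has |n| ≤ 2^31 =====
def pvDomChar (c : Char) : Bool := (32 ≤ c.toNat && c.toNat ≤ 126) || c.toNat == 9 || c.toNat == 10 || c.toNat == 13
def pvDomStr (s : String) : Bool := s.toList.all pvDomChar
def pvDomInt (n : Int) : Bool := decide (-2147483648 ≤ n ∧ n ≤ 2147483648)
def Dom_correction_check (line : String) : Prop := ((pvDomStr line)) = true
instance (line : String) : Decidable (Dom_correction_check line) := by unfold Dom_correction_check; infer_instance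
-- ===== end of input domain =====

-- B replaces A's quadratic rebuild-scans and replace-to-fixpoint loop by one map, one replace and a single stack pass; A and B differ only on a single-uppercase-letter line ≠ "A" (see D_ below).

-- ===== PORT A =====
-- unify_letters: while i < len(line)-1: if line[i].isalpha and line[i].isupper(): line = line[:i]+'A'+line[i+1:]
-- (`.isalpha` without parentheses is truthy in Python, so the condition is just isupper; the while-loop
-- is transliterated as a structural recursion on a fuel that bounds its iteration count — the list length
-- never changes, so `line.length` fuel is exact; `line.getD i ' '` = line[i], in range since i < len-1)
def unifyAGo : Nat → List Char → Nat → List Char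
  | 0, line, _ => line
  | fuel+1, line, i =>
    if i < line.length - 1 then
      if PySem.Chars.isupper (line.getD i ' ') then
        unifyAGo fuel (line.take i ++ ['A'] ++ line.drop (i + 1)) (i + 1)
      else
        unifyAGo fuel line (i + 1)
    else line

def unifyA (line : List Char) : List Char := unifyAGo line.length line 0

-- no_negotions: while i < len(line): if line[i]=='(' and line[i+1:i+4]=='!A)': line = line[:i]+'A'+line[i+4:]
-- (line[i+1:i+4] ported as (drop (i+1)).take 3 — exact for these nonnegative in-order bounds; i grows by 1
-- each iteration and the list only shrinks, so `line.length` fuel again bounds the while-loop exactly)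
def negAGo : Nat → List Char → Nat → List Char
  | 0, line, _ => line
  | fuel+1, line, i =>
    if i < line.length then
      if line.getD i ' ' = '(' ∧ (line.drop (i + 1)).take 3 = ['!', 'A', ')'] then
        negAGo fuel (line.take i ++ ['A'] ++ line.drop (i + 4)) (i + 1)
      else
        negAGo fuel line (i + 1)
    else line

def negA (line : List Char) : List Char := negAGo line.length line 0

-- find_binary: for i in range(0, len(line)-5): if line[i:i+6] == '(A'+op+'A)': return True
def findBinA (line op : List Char) : Bool :=
  (List.range (line.length - 5)).any (fun i => (line.drop i).take 6 == ['(', 'A'] ++ op ++ ['A', ')'])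

-- while find_binary(simplified, '/\\'): simplified = simplified.replace('(A/\\A)', 'A')
-- (each replace strictly shrinks the string — proved in length_replace_pat6_lt below — so `s.length`
-- fuel bounds the while-loop's iterations exactly)
def redLoopGo : Nat → List Char → List Char
  | 0, s => s
  | fuel+1, s =>
    if findBinA s ['/', '\\'] then
      redLoopGo fuel (PySem.Chars.replace s ['(', 'A', '/', '\\', 'A', ')'] ['A'])
    else s

def correction_check (line : String) : Bool :=
  -- operations = ['/\\','\\/','->','~']
  let simplified := unifyA line.toList
  -- `if simplified == None: return False` is unreachable: unify_letters always returns a str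
  let simplified := negA simplified
  let simplified := [['/', '\\'], ['\\', '/'], ['-', '>'], ['~']].foldl
    (fun s op => PySem.Chars.replace s op ['/', '\\']) simplified
  let simplified := redLoopGo simplified.length simplified
  simplified == ['A']

-- ===== PORT B =====
def stepB (st : List Char) (c : Char) : List Char :=
  if c = ')' ∧ (st ++ [c]).drop ((st ++ [c]).length - 6) = ['(', 'A', '/', '\\', 'A', ')'] then
    (st ++ [c]).take ((st ++ [c]).length - 6) ++ ['A']
  else st ++ [c]

def correction_check_alt (line : String) : Bool :=
  let s := line.toList.map (fun c => if PySem.Chars.isupper c then 'A' else c)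
  let s := PySem.Chars.replace s ['(', '!', 'A', ')'] ['A']
  let s := [['\\', '/'], ['-', '>'], ['~']].foldl
    (fun s op => PySem.Chars.replace s op ['/', '\\']) s
  let st := s.foldl stepB []
  st == ['A']

-- ===== PRECONDITION & SPEC =====
-- On a line that is a single uppercase letter other than 'A' (e.g. "B"), A returns false because
-- its unify_letters loop (while i < len(line)-1) never rewrites the last character, while B
-- returns true, the intended answer since such a line is already a single atom.
def D_correction_check (line : String) : Prop :=
  line.toList.length = 1 ∧
    line.toList.all (fun c => PySem.Chars.isupper c && c != 'A') = true
instance (line : String) : Decidable (D_correction_check line) := by unfold D_correction_check; infer_instance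

def Spec_correction_check (line : String) (out : Bool) : Prop :=
  ¬ D_correction_check line → out = correction_check_alt line
instance (line : String) (out : Bool) : Decidable (Spec_correction_check line out) := by unfold Spec_correction_check; infer_instance

def pvDiffWitness_correction_check : String := "B"
def pvDiffWitnessOut_correction_check : Bool × Bool := (false, true)

-- ===== CLAIM (what is proved, stated in full; the proofs are below) =====
def Claim_unchanged_correction_check : Prop := ∀ (line : String), Dom_correction_check line → Spec_correction_check line (correction_check line)
def Claim_changed_correction_check : Prop := Dom_correction_check (pvDiffWitness_correction_check) ∧ D_correction_check (pvDiffWitness_correction_check) ∧ correction_check (pvDiffWitness_correction_check) = pvDiffWitnessOut_correction_check.1 ∧ correction_check_alt (pvDiffWitness_correction_check) = pvDiffWitnessOut_correction_check.2 ∧ pvDiffWitnessOut_correction_check.1 ≠ pvDiffWitnessOut_correction_check.2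
def Claim_exact_correction_check : Prop := ∀ (line : String), Dom_correction_check line → D_correction_check line → correction_check line ≠ correction_check_alt line

-- ===== LEMMAS AND PROOFS =====

-- a fuel-indexed transcription of PySem.Chars.replace.go, to reason about str.replace
def pvRepl (old new : List Char) : Nat → List Char → List Char
  | _, [] => []
  | 0, l => l
  | fuel+1, c :: t =>
    if old.isPrefixOf (c :: t) then new ++ pvRepl old new fuel ((c :: t).drop old.length)
    else c :: pvRepl old new fuel t

theorem pvRepl_go_eq (old new : List Char) :
    ∀ (fuel : Nat) (l acc : List Char),
      PySem.Chars.replace.go old new fuel l acc = acc.reverse ++ pvRepl old new fuel l := by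
  intro fuel
  induction fuel with
  | zero => intro l acc; cases l <;> simp [PySem.Chars.replace.go, pvRepl]
  | succ n ih =>
    intro l acc
    cases l with
    | nil => simp [PySem.Chars.replace.go, pvRepl]
    | cons c t =>
      simp only [PySem.Chars.replace.go, pvRepl]
      split <;> simp [ih]

theorem replace_eq_pvRepl (old new l : List Char) (h : old ≠ []) :
    PySem.Chars.replace l old new = pvRepl old new l.length l := by
  have : old.isEmpty = false := by simpa using h
  simp [PySem.Chars.replace, this, pvRepl_go_eq]

theorem length_pvRepl_le (old new : List Char) (hne : old ≠ []) (hlen : new.length ≤ old.length) :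
    ∀ (fuel : Nat) (l : List Char), (pvRepl old new fuel l).length ≤ l.length := by
  intro fuel
  induction fuel with
  | zero => intro l; cases l <;> simp [pvRepl]
  | succ n ih =>
    intro l
    cases l with
    | nil => simp [pvRepl]
    | cons c t =>
      simp only [pvRepl]
      split
      · rename_i hp
        have hol : old.length ≤ (c :: t).length := (List.isPrefixOf_iff_prefix.mp hp).length_le
        have := ih ((c :: t).drop old.length)
        simp only [List.length_append, List.length_drop] at *
        omega
      · have := ih t; simp only [List.length_cons]; omega

def pvPat6 : List Char := ['(', 'A', '/', '\\', 'A', ')']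

theorem length_replace_pat6_lt (l : List Char) (h : pvPat6 <:+: l) :
    (PySem.Chars.replace l pvPat6 ['A']).length < l.length := by
  have hne : pvPat6 ≠ [] := by simp [pvPat6]
  rw [replace_eq_pvRepl _ _ _ hne]
  have key : ∀ (fuel : Nat) (l : List Char), l.length ≤ fuel → pvPat6 <:+: l →
      (pvRepl pvPat6 ['A'] fuel l).length < l.length := by
    intro fuel
    induction fuel with
    | zero =>
      intro l hl hinf
      have : l = [] := by cases l <;> simp_all
      subst this
      rw [List.infix_nil] at hinf
      simp [pvPat6] at hinf
    | succ n ih =>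
      intro l hl hinf
      cases l with
      | nil => rw [List.infix_nil] at hinf; simp [pvPat6] at hinf
      | cons c t =>
        simp only [pvRepl]
        split
        · rename_i hp
          have hol : pvPat6.length ≤ (c :: t).length :=
            (List.isPrefixOf_iff_prefix.mp hp).length_le
          have hle := length_pvRepl_le pvPat6 ['A'] hne (by simp [pvPat6]) n
              ((c :: t).drop pvPat6.length)
          have h6 : pvPat6.length = 6 := rfl
          simp only [h6] at hle hol ⊢
          simp only [List.length_append, List.length_drop, List.length_cons,
            List.length_nil] at hle hol ⊢
          omega
        · rename_i hp
          have hp' : ¬ pvPat6 <+: (c :: t) := fun hc => hp (List.isPrefixOf_iff_prefix.mpr hc)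
          rcases List.infix_cons_iff.mp hinf with h1 | h2
          · exact absurd h1 hp'
          · have := ih t (by simp at hl; omega) h2
            simp only [List.length_cons]; omega
  exact key l.length l le_rfl h

theorem pvRepl_congr (old new : List Char) (hne : old ≠ []) :
    ∀ (f1 f2 : Nat) (l : List Char), l.length ≤ f1 → l.length ≤ f2 →
      pvRepl old new f1 l = pvRepl old new f2 l := by
  intro f1
  induction f1 with
  | zero =>
    intro f2 l h1 _
    have : l = [] := by cases l <;> simp_all
    subst this; cases f2 <;> simp [pvRepl]
  | succ n ih =>
    intro f2 l h1 h2
    cases l with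
    | nil => cases f2 <;> simp [pvRepl]
    | cons c t =>
      cases f2 with
      | zero => simp at h2
      | succ m =>
        simp only [pvRepl]
        split
        · rename_i hp
          have hol : 1 ≤ old.length := by cases old <;> simp_all
          have : ((c :: t).drop old.length).length ≤ n := by
            simp only [List.length_drop, List.length_cons] at *; omega
          have h2' : ((c :: t).drop old.length).length ≤ m := by
            simp only [List.length_drop, List.length_cons] at *; omega
          rw [ih _ _ this h2']
        · have : t.length ≤ n := by simp at h1; omega
          have h2' : t.length ≤ m := by simp at h2; omega
          rw [ih _ _ this h2']

theorem replace_nil (old new : List Char) (h : old ≠ []) :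
    PySem.Chars.replace [] old new = [] := by
  simp [replace_eq_pvRepl _ _ _ h, pvRepl]

theorem replace_pos (old new l : List Char) (h : old ≠ []) (hp : old <+: l) :
    PySem.Chars.replace l old new = new ++ PySem.Chars.replace (l.drop old.length) old new := by
  obtain ⟨t0, rfl⟩ := hp
  cases old with
  | nil => exact absurd rfl h
  | cons o os =>
    rw [replace_eq_pvRepl _ _ _ h, replace_eq_pvRepl _ _ _ h]
    have hlen : ((o :: os) ++ t0).length = ((o :: os) ++ t0).length - 1 + 1 := by
      simp only [List.length_append, List.length_cons]; omega
    rw [hlen]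
    simp only [pvRepl, List.cons_append]
    rw [if_pos (List.isPrefixOf_iff_prefix.mpr ⟨t0, by simp⟩)]
    congr 1
    apply pvRepl_congr _ _ h <;> simp only [List.length_drop, List.length_append, List.length_cons] <;> omega

theorem replace_neg (old new : List Char) (c : Char) (t : List Char) (h : old ≠ [])
    (hp : ¬ old <+: (c :: t)) :
    PySem.Chars.replace (c :: t) old new = c :: PySem.Chars.replace t old new := by
  rw [replace_eq_pvRepl _ _ _ h, replace_eq_pvRepl _ _ _ h]
  simp only [List.length_cons, pvRepl]
  rw [if_neg (fun hc => hp (List.isPrefixOf_iff_prefix.mp hc))]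

theorem replace_singleton (old new : List Char) (c : Char) (h : old ≠ [])
    (hp : ¬ old <+: [c]) :
    PySem.Chars.replace [c] old new = [c] := by
  rw [replace_neg _ _ _ _ h hp, replace_nil _ _ h]

-- A's unification rewrites every uppercase character except the last one (while i < len-1)
def pvMapInit (l : List Char) : List Char :=
  (l.take (l.length - 1)).map (fun c => if PySem.Chars.isupper c then 'A' else c)
    ++ l.drop (l.length - 1)

theorem pvMapInit_short (l : List Char) (h : l.length ≤ 1) : pvMapInit l = l := by
  cases l with
  | nil => rfl
  | cons c t =>
    have : t = [] := by cases t <;> simp_all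
    subst this; rfl

theorem pvMapInit_cons (c : Char) (l : List Char) (h : l ≠ []) :
    pvMapInit (c :: l) = (if PySem.Chars.isupper c then 'A' else c) :: pvMapInit l := by
  obtain ⟨k, hk⟩ : ∃ k, l.length = k + 1 := by cases l <;> simp_all
  unfold pvMapInit
  simp [hk, List.take_succ_cons]

theorem take_succ_getElem (l : List Char) (i : Nat) (hi : i < l.length) :
    l.take (i + 1) = l.take i ++ [l[i]] := by
  rw [List.take_succ, List.getElem?_eq_getElem hi]
  rfl

theorem unifyAGo_eq :
    ∀ (fuel : Nat) (l : List Char) (i : Nat), l.length ≤ i + fuel →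
      unifyAGo fuel l i = l.take i ++ pvMapInit (l.drop i) := by
  intro fuel
  induction fuel with
  | zero =>
    intro l i hf
    simp only [Nat.add_zero] at hf
    rw [unifyAGo, List.drop_eq_nil_of_le hf]
    rw [show pvMapInit [] = [] from rfl, List.append_nil, List.take_of_length_le hf]
  | succ n ih =>
    intro l i hf
    rw [unifyAGo]
    by_cases h : i < l.length - 1
    · rw [if_pos h]
      have hi : i < l.length := by omega
      have hgd : l.getD i ' ' = l[i] := List.getD_eq_getElem l ' ' hi
      rw [hgd]
      have hdc : l.drop i = l[i] :: l.drop (i + 1) := List.drop_eq_getElem_cons hi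
      have hne : l.drop (i + 1) ≠ [] := by
        intro hc
        have := congrArg List.length hc
        simp at this; omega
      by_cases hu : PySem.Chars.isupper l[i] = true
      · rw [if_pos hu]
        have hti : (l.take i).length = i := by simp; omega
        have hlen' : ((l.take i ++ ['A']) ++ l.drop (i + 1)).length ≤ (i + 1) + n := by
          simp only [List.length_append, List.length_take, List.length_drop,
            List.length_cons, List.length_nil]
          omega
        rw [show l.take i ++ ['A'] ++ l.drop (i + 1) = (l.take i ++ ['A']) ++ l.drop (i + 1) from by
          simp, ih _ _ hlen']
        have h1 : ((l.take i ++ ['A']) ++ l.drop (i + 1)).take (i + 1) = l.take i ++ ['A'] := by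
          apply List.take_left'
          simp [hti]
        have h2 : ((l.take i ++ ['A']) ++ l.drop (i + 1)).drop (i + 1) = l.drop (i + 1) := by
          apply List.drop_left'
          simp [hti]
        rw [h1, h2, hdc, pvMapInit_cons _ _ hne, if_pos hu]
        simp
      · rw [if_neg hu]
        rw [ih l (i + 1) (by omega)]
        rw [hdc, pvMapInit_cons _ _ hne, if_neg hu]
        rw [take_succ_getElem l i hi, List.append_assoc, List.singleton_append]
    · rw [if_neg h]
      rw [pvMapInit_short _ (by simp; omega), List.take_append_drop]

def pvPat4 : List Char := ['(', '!', 'A', ')']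

theorem negAGo_eq :
    ∀ (fuel : Nat) (l : List Char) (i : Nat), l.length ≤ i + fuel →
      negAGo fuel l i = l.take i ++ PySem.Chars.replace (l.drop i) pvPat4 ['A'] := by
  have h4 : pvPat4 ≠ [] := by simp [pvPat4]
  intro fuel
  induction fuel with
  | zero =>
    intro l i hf
    simp only [Nat.add_zero] at hf
    rw [negAGo, List.drop_eq_nil_of_le hf, replace_nil _ _ h4,
      List.append_nil, List.take_of_length_le hf]
  | succ n ih =>
    intro l i hf
    rw [negAGo]
    by_cases h : i < l.length
    · rw [if_pos h]
      have hgd : l.getD i ' ' = l[i] := List.getD_eq_getElem l ' ' h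
      rw [hgd]
      have hdc : l.drop i = l[i] :: l.drop (i + 1) := List.drop_eq_getElem_cons h
      by_cases hc : l[i] = '(' ∧ (l.drop (i + 1)).take 3 = ['!', 'A', ')']
      · rw [if_pos hc]
        have h3 : ((l.drop (i + 1)).take 3).length = 3 := by rw [hc.2]; rfl
        have hi4 : i + 4 ≤ l.length := by
          simp only [List.length_take, List.length_drop] at h3
          omega
        have hpre3 : ['!', 'A', ')'] <+: l.drop (i + 1) := by
          rw [List.prefix_iff_eq_take]
          simpa using hc.2.symm
        have hpre : pvPat4 <+: l.drop i := by
          rw [hdc, hc.1]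
          simpa [pvPat4, List.cons_prefix_cons] using hpre3
        have hlen' : ((l.take i ++ ['A']) ++ l.drop (i + 4)).length ≤ (i + 1) + n := by
          simp only [List.length_append, List.length_take, List.length_drop,
            List.length_cons, List.length_nil]
          omega
        rw [show l.take i ++ ['A'] ++ l.drop (i + 4) = (l.take i ++ ['A']) ++ l.drop (i + 4) from by
          simp, ih _ _ hlen']
        have hti : (l.take i).length = i := by simp; omega
        have h1 : ((l.take i ++ ['A']) ++ l.drop (i + 4)).take (i + 1) = l.take i ++ ['A'] := by
          apply List.take_left'
          simp [hti]
        have h2 : ((l.take i ++ ['A']) ++ l.drop (i + 4)).drop (i + 1) = l.drop (i + 4) := by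
          apply List.drop_left'
          simp [hti]
        rw [h1, h2, replace_pos _ _ _ h4 hpre]
        have : (l.drop i).drop pvPat4.length = l.drop (i + 4) := by
          rw [List.drop_drop]
          congr 1
        rw [this]
        simp
      · rw [if_neg hc]
        have hnp : ¬ pvPat4 <+: l.drop i := by
          intro hp
          rw [hdc] at hp
          rw [show pvPat4 = '(' :: ['!', 'A', ')'] from rfl, List.cons_prefix_cons] at hp
          apply hc
          refine ⟨hp.1.symm, ?_⟩
          simpa using (List.prefix_iff_eq_take.mp hp.2).symm
        rw [ih l (i + 1) (by omega)]
        rw [hdc, replace_neg _ _ _ _ h4 (by rwa [hdc] at hnp)]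
        rw [take_succ_getElem l i h, List.append_assoc, List.singleton_append]
    · rw [if_neg h]
      have hdrop : l.drop i = [] := List.drop_eq_nil_of_le (by omega)
      rw [hdrop, replace_nil _ _ h4, List.append_nil, List.take_of_length_le (by omega)]

theorem replace_self (old : List Char) (h : old ≠ []) :
    ∀ (n : Nat) (l : List Char), l.length ≤ n → PySem.Chars.replace l old old = l := by
  intro n
  induction n with
  | zero =>
    intro l hl
    have : l = [] := by cases l <;> simp_all
    subst this; exact replace_nil _ _ h
  | succ n ih =>
    intro l hl
    by_cases hp : old <+: l
    · obtain ⟨t, rfl⟩ := hp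
      rw [replace_pos _ _ _ h ⟨t, rfl⟩, List.drop_left]
      have hol : 0 < old.length := List.length_pos_of_ne_nil h
      rw [ih t (by simp at hl; omega)]
    · cases l with
      | nil => exact replace_nil _ _ h
      | cons c t =>
        rw [replace_neg _ _ _ _ h hp, ih t (by simp at hl; omega)]

-- a match of `old` cannot cover the final character when old's last char differs from it
theorem pvRepl_append_last (old new : List Char) (c : Char) (h : old ≠ [])
    (hlast : old.getLast? ≠ some c) :
    ∀ (fuel : Nat) (x : List Char), x.length < fuel →
      pvRepl old new fuel (x ++ [c]) = pvRepl old new fuel x ++ [c] := by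
  intro fuel
  induction fuel with
  | zero => intro x hx; omega
  | succ n ih =>
    intro x hx
    cases x with
    | nil =>
      have hnp : ¬ old.isPrefixOf [c] := by
        intro hp
        have hp' := List.isPrefixOf_iff_prefix.mp hp
        have hle := hp'.length_le
        have : old = [c] := by
          have h1 : 1 ≤ old.length := by cases old <;> simp_all
          have : old.length = 1 := by simp at hle; omega
          obtain ⟨a, ha⟩ : ∃ a, old = [a] := by
            cases old with
            | nil => simp at this
            | cons a t => cases t <;> simp_all
          subst ha
          rcases List.prefix_iff_eq_take.mp hp' with he
          simpa using he
        rw [this] at hlast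
        simp at hlast
      simp only [List.nil_append, pvRepl, if_neg hnp]
    | cons a t =>
      have hstep : old.isPrefixOf ((a :: t) ++ [c]) = old.isPrefixOf (a :: t) := by
        by_cases hp : old <+: (a :: t)
        · rw [List.isPrefixOf_iff_prefix.mpr (hp.trans ⟨[c], rfl⟩),
            List.isPrefixOf_iff_prefix.mpr hp]
        · rw [Bool.eq_iff_iff]
          simp only [List.isPrefixOf_iff_prefix]
          constructor
          · intro hpc
            have hle := hpc.length_le
            simp only [List.length_append, List.length_cons, List.length_nil] at hle
            by_cases heq : old.length = t.length + 2
            · exfalso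
              have hold : old = (a :: t) ++ [c] := by
                have h1 := List.prefix_iff_eq_take.mp hpc
                rw [h1, List.take_of_length_le (by simp; omega)]
              apply hlast
              rw [hold, List.getLast?_concat]
            · have hle2 : old.length ≤ (a :: t).length := by
                simp only [List.length_cons]
                omega
              have h1 := List.prefix_iff_eq_take.mp hpc
              have key : old = (a :: t).take old.length := by
                conv_lhs => rw [h1]
                exact List.take_append_of_le_length hle2
              exact absurd (List.prefix_iff_eq_take.mpr key) hp
          · intro hpc; exact hpc.trans ⟨[c], rfl⟩
      have hun : ∀ (m : Nat) (b : Char) (u : List Char),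
          pvRepl old new (m + 1) (b :: u)
            = if old.isPrefixOf (b :: u) then new ++ pvRepl old new m ((b :: u).drop old.length)
              else b :: pvRepl old new m u := fun _ _ _ => rfl
      rw [show (a :: t) ++ [c] = a :: (t ++ [c]) from rfl, hun, hun,
        show a :: (t ++ [c]) = (a :: t) ++ [c] from rfl, hstep]
      by_cases hp : old.isPrefixOf (a :: t)
      · rw [if_pos hp, if_pos hp]
        have hlen1 : 1 ≤ old.length := by cases old <;> simp_all
        have hol : old.length ≤ t.length + 1 :=
          (List.isPrefixOf_iff_prefix.mp hp).length_le
        have hdrop : ((a :: t) ++ [c]).drop old.length = (a :: t).drop old.length ++ [c] := by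
          rw [List.drop_append_of_le_length (by simpa using hol)]
        rw [hdrop, ih _ (by
          simp only [List.length_drop, List.length_cons]
          simp only [List.length_cons] at hx
          omega)]
        simp
      · rw [if_neg hp, if_neg hp]
        rw [ih t (by simp at hx; omega)]
        simp

theorem replace_append_last (old new : List Char) (c : Char) (h : old ≠ [])
    (hlast : old.getLast? ≠ some c) (x : List Char) :
    PySem.Chars.replace (x ++ [c]) old new = PySem.Chars.replace x old new ++ [c] := by
  rw [replace_eq_pvRepl _ _ _ h, replace_eq_pvRepl _ _ _ h]
  have hl : (x ++ [c]).length = x.length + 1 := by simp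
  rw [hl, pvRepl_append_last old new c h hlast (x.length + 1) x (by omega)]
  congr 1
  exact pvRepl_congr old new h _ _ x (by omega) le_rfl

theorem replace_ne_nil (old new l : List Char) (h : old ≠ []) (hn : new ≠ []) (hl : l ≠ []) :
    PySem.Chars.replace l old new ≠ [] := by
  rw [replace_eq_pvRepl _ _ _ h]
  cases l with
  | nil => simp_all
  | cons a t =>
    simp only [List.length_cons, pvRepl]
    split
    · simp [hn]
    · simp

theorem stepB_ne (st : List Char) (c : Char) (h : ¬ c = ')') : stepB st c = st ++ [c] := by
  simp [stepB, h]

theorem stepB_ne_nil (st : List Char) (c : Char) : stepB st c ≠ [] := by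
  unfold stepB
  split <;> simp

theorem foldl_stepB_ne_nil : ∀ (s st : List Char), st ≠ [] → List.foldl stepB st s ≠ [] := by
  intro s
  induction s with
  | nil => intro st h; simpa
  | cons a t ih => intro st _; exact ih (stepB st a) (stepB_ne_nil st a)

theorem stepB_close (st : List Char) : stepB (st ++ ['(', 'A', '/', '\\', 'A']) ')' = st ++ ['A'] := by
  have h1 : (st ++ ['(', 'A', '/', '\\', 'A']) ++ [')'] = st ++ pvPat6 := by
    simp [pvPat6]
  have hlen : (st ++ pvPat6).length - 6 = st.length := by simp [pvPat6]
  unfold stepB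
  rw [h1, hlen, List.drop_left, List.take_left]
  simp [pvPat6]

theorem foldl_step_pat (st y : List Char) :
    List.foldl stepB st (pvPat6 ++ y) = List.foldl stepB (st ++ ['A']) y := by
  show List.foldl stepB st ('(' :: 'A' :: '/' :: '\\' :: 'A' :: ')' :: y) = _
  simp only [List.foldl_cons]
  rw [stepB_ne st '(' (by decide), stepB_ne _ 'A' (by decide), stepB_ne _ '/' (by decide),
    stepB_ne _ '\\' (by decide), stepB_ne _ 'A' (by decide)]
  have : ((((st ++ ['(']) ++ ['A']) ++ ['/']) ++ ['\\']) ++ ['A'] = st ++ ['(', 'A', '/', '\\', 'A'] := by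
    simp
  rw [this, stepB_close]

theorem foldl_step_replace :
    ∀ (n : Nat) (s : List Char), s.length ≤ n → ∀ (st : List Char),
      List.foldl stepB st (PySem.Chars.replace s pvPat6 ['A']) = List.foldl stepB st s := by
  have h6 : pvPat6 ≠ [] := by simp [pvPat6]
  intro n
  induction n with
  | zero =>
    intro s hs st
    have : s = [] := by cases s <;> simp_all
    subst this
    rw [replace_nil _ _ h6]
  | succ n ih =>
    intro s hs st
    by_cases hp : pvPat6 <+: s
    · obtain ⟨t, rfl⟩ := hp
      rw [replace_pos _ _ _ h6 ⟨t, rfl⟩, List.drop_left]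
      have hA : ¬ 'A' = ')' := by decide
      show List.foldl stepB st ('A' :: PySem.Chars.replace t pvPat6 ['A']) = _
      rw [List.foldl_cons, stepB_ne st 'A' hA]
      rw [ih t (by simp [pvPat6] at hs; omega) (st ++ ['A'])]
      rw [foldl_step_pat]
    · cases s with
      | nil => rw [replace_nil _ _ h6]
      | cons c t =>
        rw [replace_neg _ _ _ _ h6 hp]
        rw [List.foldl_cons, List.foldl_cons]
        exact ih t (by simp at hs; omega) (stepB st c)

theorem foldl_step_nf :
    ∀ (s st : List Char), ¬ pvPat6 <:+: (st ++ s) → List.foldl stepB st s = st ++ s := by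
  intro s
  induction s with
  | nil => intro st _; simp
  | cons c t ih =>
    intro st hinf
    have hstep : stepB st c = st ++ [c] := by
      unfold stepB
      rw [if_neg]
      intro hcond
      apply hinf
      have hsuf : pvPat6 <:+ st ++ [c] := by
        rw [show pvPat6 = ['(', 'A', '/', '\\', 'A', ')'] from rfl, ← hcond.2]
        exact List.drop_suffix _ _
      obtain ⟨u, hu⟩ := hsuf
      exact ⟨u, t, by rw [hu]; simp⟩
    rw [List.foldl_cons, hstep, ih (st ++ [c]) (by rwa [List.append_assoc, List.singleton_append])]
    simp

theorem findBinA_iff (s : List Char) : findBinA s ['/', '\\'] = true ↔ pvPat6 <:+: s := by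
  unfold findBinA
  simp only [List.any_eq_true, List.mem_range, beq_iff_eq]
  constructor
  · rintro ⟨i, hi, hEq⟩
    have hpre : pvPat6 <+: s.drop i := by
      rw [List.prefix_iff_eq_take]
      simpa [pvPat6] using hEq.symm
    obtain ⟨u, hu⟩ := hpre
    exact ⟨s.take i, u, by rw [List.append_assoc, hu, List.take_append_drop]⟩
  · rintro ⟨u, v, huv⟩
    refine ⟨u.length, ?_, ?_⟩
    · have := congrArg List.length huv
      simp [pvPat6] at this
      omega
    · have hd : s.drop u.length = pvPat6 ++ v := by
        rw [← huv, List.append_assoc, List.drop_left]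
      rw [hd]
      exact List.take_left' (l₁ := pvPat6) rfl

theorem redLoopGo_nf :
    ∀ (fuel : Nat) (s : List Char), s.length ≤ fuel →
      findBinA (redLoopGo fuel s) ['/', '\\'] = false := by
  intro fuel
  induction fuel with
  | zero =>
    intro s hs
    have : s = [] := by cases s <;> simp_all
    subst this
    rw [redLoopGo]
    simp [findBinA]
  | succ n ih =>
    intro s hs
    rw [redLoopGo]
    by_cases h : findBinA s ['/', '\\'] = true
    · rw [if_pos h]
      have hlt := length_replace_pat6_lt s ((findBinA_iff s).mp h)
      exact ih _ (by rw [show ['(', 'A', '/', '\\', 'A', ')'] = pvPat6 from rfl]; omega)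
    · rw [if_neg h]
      simpa using h

theorem redLoopGo_foldl :
    ∀ (fuel : Nat) (s st : List Char), s.length ≤ fuel →
      List.foldl stepB st (redLoopGo fuel s) = List.foldl stepB st s := by
  intro fuel
  induction fuel with
  | zero => intro s st _; rw [redLoopGo]
  | succ n ih =>
    intro s st hs
    rw [redLoopGo]
    by_cases h : findBinA s ['/', '\\'] = true
    · rw [if_pos h]
      have hlt := length_replace_pat6_lt s ((findBinA_iff s).mp h)
      rw [ih _ st (by rw [show ['(', 'A', '/', '\\', 'A', ')'] = pvPat6 from rfl]; omega)]
      exact foldl_step_replace s.length s le_rfl st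
    · rw [if_neg h]

theorem redLoopGo_last (c : Char) (hc : ¬ c = ')') :
    ∀ (fuel : Nat) (x : List Char), ∃ y, redLoopGo fuel (x ++ [c]) = y ++ [c] := by
  have h6 : pvPat6 ≠ [] := by simp [pvPat6]
  have hlast : pvPat6.getLast? ≠ some c := by
    intro h
    simp [pvPat6] at h
    exact hc h.symm
  intro fuel
  induction fuel with
  | zero => intro x; exact ⟨x, rfl⟩
  | succ n ih =>
    intro x
    rw [redLoopGo]
    by_cases hfb : findBinA (x ++ [c]) ['/', '\\'] = true
    · rw [if_pos hfb]
      rw [show ['(', 'A', '/', '\\', 'A', ')'] = pvPat6 from rfl,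
        replace_append_last pvPat6 ['A'] c h6 hlast x]
      exact ih _
    · rw [if_neg hfb]
      exact ⟨x, rfl⟩

-- an uppercase letter is none of the operator / bracket characters
theorem upper_facts (c : Char) (hu : PySem.Chars.isupper c = true) :
    c ≠ '(' ∧ c ≠ ')' ∧ c ≠ '!' ∧ c ≠ '/' ∧ c ≠ '\\' ∧ c ≠ '-' ∧ c ≠ '>' ∧ c ≠ '~' := by
  simp only [PySem.Chars.isupper, Bool.and_eq_true, decide_eq_true_eq] at hu
  obtain ⟨h1, h2⟩ := hu
  refine ⟨?_, ?_, ?_, ?_, ?_, ?_, ?_, ?_⟩ <;>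
    (intro h; subst h; revert h1 h2; decide)

theorem pvMapInit_concat (x : List Char) (c : Char) :
    pvMapInit (x ++ [c]) =
      x.map (fun d => if PySem.Chars.isupper d then 'A' else d) ++ [c] := by
  unfold pvMapInit
  have h1 : (x ++ [c]).length - 1 = x.length := by simp
  rw [h1, List.take_left, List.drop_left]

theorem correction_check_A_eq (line : String) :
    correction_check line
      = (redLoopGo ([['/', '\\'], ['\\', '/'], ['-', '>'], ['~']].foldl
            (fun s op => PySem.Chars.replace s op ['/', '\\'])
            (PySem.Chars.replace (pvMapInit line.toList) pvPat4 ['A'])).length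
          ([['/', '\\'], ['\\', '/'], ['-', '>'], ['~']].foldl
            (fun s op => PySem.Chars.replace s op ['/', '\\'])
            (PySem.Chars.replace (pvMapInit line.toList) pvPat4 ['A'])) == ['A']) := by
  unfold correction_check unifyA negA
  rw [unifyAGo_eq line.toList.length line.toList 0 (by omega)]
  simp only [List.take_zero, List.drop_zero, List.nil_append]
  rw [negAGo_eq (pvMapInit line.toList).length (pvMapInit line.toList) 0 (by omega)]
  simp only [List.take_zero, List.drop_zero, List.nil_append]

-- the common tail of both pipelines, starting from the same unified string
theorem pipelines_agree (u : List Char) :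
    (redLoopGo ([['/', '\\'], ['\\', '/'], ['-', '>'], ['~']].foldl
          (fun s op => PySem.Chars.replace s op ['/', '\\'])
          (PySem.Chars.replace u pvPat4 ['A'])).length
        ([['/', '\\'], ['\\', '/'], ['-', '>'], ['~']].foldl
          (fun s op => PySem.Chars.replace s op ['/', '\\'])
          (PySem.Chars.replace u pvPat4 ['A'])) == ['A'])
    = (([['\\', '/'], ['-', '>'], ['~']].foldl
        (fun s op => PySem.Chars.replace s op ['/', '\\'])
        (PySem.Chars.replace u pvPat4 ['A'])).foldl stepB [] == ['A']) := by
  simp only [List.foldl_cons, List.foldl_nil]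
  rw [replace_self ['/', '\\'] (by simp) _ _ le_rfl]
  set Y := PySem.Chars.replace
    (PySem.Chars.replace
      (PySem.Chars.replace (PySem.Chars.replace u pvPat4 ['A']) ['\\', '/'] ['/', '\\'])
      ['-', '>'] ['/', '\\'])
    ['~'] ['/', '\\'] with hY
  have hfold : List.foldl stepB [] Y = redLoopGo Y.length Y := by
    rw [← redLoopGo_foldl Y.length Y [] le_rfl]
    have hnf : ¬ pvPat6 <:+: ([] ++ redLoopGo Y.length Y) := by
      rw [List.nil_append]
      intro hcc
      have := (findBinA_iff (redLoopGo Y.length Y)).mpr hcc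
      rw [redLoopGo_nf Y.length Y le_rfl] at this
      exact absurd this (by simp)
    rw [foldl_step_nf _ _ hnf, List.nil_append]
  rw [hfold]

-- ===== VERDICT proofs =====

theorem correction_check_spec : Claim_unchanged_correction_check := by
  unfold Claim_unchanged_correction_check Spec_correction_check
  intro line _ hD
  rw [correction_check_A_eq]
  by_cases hsame : pvMapInit line.toList
      = line.toList.map (fun c => if PySem.Chars.isupper c then 'A' else c)
  · -- the last character is not an uppercase letter other than 'A': same unified string
    rw [hsame]
    unfold correction_check_alt
    rw [pipelines_agree]
    rfl
  · -- the last character is an uppercase letter ≠ 'A' and the line has length ≥ 2: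
    -- both sides return false
    have hnil : line.toList ≠ [] := by
      intro h; apply hsame; rw [h]; rfl
    obtain ⟨x, c, hxc⟩ : ∃ x c, line.toList = x ++ [c] := by
      rcases List.eq_nil_or_concat line.toList with h | ⟨x, c, h⟩
      · exact absurd h hnil
      · exact ⟨x, c, by simpa using h⟩
    have hMI : pvMapInit line.toList
        = x.map (fun d => if PySem.Chars.isupper d then 'A' else d) ++ [c] := by
      rw [hxc, pvMapInit_concat]
    have hmap : line.toList.map (fun d => if PySem.Chars.isupper d then 'A' else d)
        = x.map (fun d => if PySem.Chars.isupper d then 'A' else d)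
          ++ [if PySem.Chars.isupper c then 'A' else c] := by
      rw [hxc]; simp
    have hup : PySem.Chars.isupper c = true ∧ c ≠ 'A' := by
      by_cases hu : PySem.Chars.isupper c = true
      · refine ⟨hu, ?_⟩
        intro hA
        apply hsame
        rw [hMI, hmap, if_pos hu, hA]
      · exfalso
        apply hsame
        rw [hMI, hmap, if_neg hu]
    have hxne : x ≠ [] := by
      intro hx
      apply hD
      constructor
      · rw [hxc, hx]; rfl
      · rw [hxc, hx]
        simp [hup.1, hup.2]
    obtain ⟨hu, hcA⟩ := hup
    obtain ⟨hc1, hc2, hc3, hc4, hc5, hc6, hc7, hc8⟩ := upper_facts c hu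
    -- A's side: the final character survives every replace and the reduction loop
    have hAfalse :
        (redLoopGo ([['/', '\\'], ['\\', '/'], ['-', '>'], ['~']].foldl
            (fun s op => PySem.Chars.replace s op ['/', '\\'])
            (PySem.Chars.replace (pvMapInit line.toList) pvPat4 ['A'])).length
          ([['/', '\\'], ['\\', '/'], ['-', '>'], ['~']].foldl
            (fun s op => PySem.Chars.replace s op ['/', '\\'])
            (PySem.Chars.replace (pvMapInit line.toList) pvPat4 ['A'])) == ['A']) = false := by
      rw [hMI]
      simp only [List.foldl_cons, List.foldl_nil]
      rw [replace_append_last pvPat4 ['A'] c (by simp [pvPat4])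
          (by intro hh; simp [pvPat4] at hh; exact hc2 hh.symm)]
      rw [replace_append_last ['/', '\\'] ['/', '\\'] c (by simp)
          (by intro hh; simp at hh; exact hc5 hh.symm)]
      rw [replace_append_last ['\\', '/'] ['/', '\\'] c (by simp)
          (by intro hh; simp at hh; exact hc4 hh.symm)]
      rw [replace_append_last ['-', '>'] ['/', '\\'] c (by simp)
          (by intro hh; simp at hh; exact hc7 hh.symm)]
      rw [replace_append_last ['~'] ['/', '\\'] c (by simp)
          (by intro hh; simp at hh; exact hc8 hh.symm)]
      obtain ⟨y, hy⟩ := redLoopGo_last c hc2 _ _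
      rw [hy]
      rw [beq_eq_false_iff_ne]
      intro he
      cases y with
      | nil => exact hcA (by simpa using he)
      | cons a t =>
        have hlen2 := congrArg List.length he
        simp only [List.cons_append, List.length_append, List.length_cons,
          List.length_nil] at hlen2
        omega
    rw [hAfalse]
    -- B's side: the string ends in 'A' and has a nonempty prefix before it
    unfold correction_check_alt
    simp only [List.foldl_cons, List.foldl_nil]
    rw [hmap, if_pos hu]
    have hA4 : (pvPat4.getLast? ≠ some 'A') := by
      simp only [pvPat4]; decide
    have e1 := replace_append_last pvPat4 ['A'] 'A' (by simp [pvPat4]) hA4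
      (x.map (fun d => if PySem.Chars.isupper d then 'A' else d))
    rw [show ['(', '!', 'A', ')'] = pvPat4 from rfl, e1]
    rw [replace_append_last ['\\', '/'] ['/', '\\'] 'A' (by simp) (by decide)]
    rw [replace_append_last ['-', '>'] ['/', '\\'] 'A' (by simp) (by decide)]
    rw [replace_append_last ['~'] ['/', '\\'] 'A' (by simp) (by decide)]
    have hy1 : PySem.Chars.replace (x.map (fun d => if PySem.Chars.isupper d then 'A' else d))
        pvPat4 ['A'] ≠ [] :=
      replace_ne_nil _ _ _ (by simp [pvPat4]) (by simp) (by simpa using hxne)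
    have hy2 := replace_ne_nil ['\\', '/'] ['/', '\\'] _ (by simp) (by simp) hy1
    have hy3 := replace_ne_nil ['-', '>'] ['/', '\\'] _ (by simp) (by simp) hy2
    have hy4 := replace_ne_nil ['~'] ['/', '\\'] _ (by simp) (by simp) hy3
    rw [List.foldl_append]
    set st := List.foldl stepB [] (PySem.Chars.replace
      (PySem.Chars.replace
        (PySem.Chars.replace (PySem.Chars.replace
          (x.map (fun d => if PySem.Chars.isupper d then 'A' else d)) pvPat4 ['A'])
          ['\\', '/'] ['/', '\\']) ['-', '>'] ['/', '\\']) ['~'] ['/', '\\']) with hst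
    have hstne : st ≠ [] := by
      rw [hst]
      obtain ⟨b, t, hbt⟩ : ∃ b t, PySem.Chars.replace
          (PySem.Chars.replace
            (PySem.Chars.replace (PySem.Chars.replace
              (x.map (fun d => if PySem.Chars.isupper d then 'A' else d)) pvPat4 ['A'])
              ['\\', '/'] ['/', '\\']) ['-', '>'] ['/', '\\']) ['~'] ['/', '\\'] = b :: t := by
        cases h : PySem.Chars.replace
          (PySem.Chars.replace
            (PySem.Chars.replace (PySem.Chars.replace
              (x.map (fun d => if PySem.Chars.isupper d then 'A' else d)) pvPat4 ['A'])
              ['\\', '/'] ['/', '\\']) ['-', '>'] ['/', '\\']) ['~'] ['/', '\\'] with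
        | nil => exact absurd h hy4
        | cons b t => exact ⟨b, t, rfl⟩
      rw [hbt, List.foldl_cons]
      exact foldl_stepB_ne_nil t _ (stepB_ne_nil [] b)
    simp only [List.foldl_cons, List.foldl_nil]
    rw [stepB_ne st 'A' (by decide)]
    symm
    rw [beq_eq_false_iff_ne]
    intro he
    apply hstne
    have hlen2 := congrArg List.length he
    simp only [List.length_append, List.length_cons, List.length_nil] at hlen2
    exact List.eq_nil_of_length_eq_zero (by omega)

theorem A_single_false (line : String) (c : Char) (hc : line.toList = [c])
    (hu : PySem.Chars.isupper c = true) (hcA : c ≠ 'A') :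
    correction_check line = false := by
  obtain ⟨hc1, hc2, hc3, hc4, hc5, hc6, hc7, hc8⟩ := upper_facts c hu
  rw [correction_check_A_eq]
  have hMI : pvMapInit line.toList = [c] := by
    rw [hc]; exact pvMapInit_short _ (by simp)
  rw [hMI]
  simp only [List.foldl_cons, List.foldl_nil]
  have r1 : PySem.Chars.replace [c] pvPat4 ['A'] = [c] :=
    replace_singleton _ _ _ (by simp [pvPat4])
      (by intro h; have := h.length_le; simp [pvPat4] at this)
  have r2 : PySem.Chars.replace [c] ['/', '\\'] ['/', '\\'] = [c] :=
    replace_self _ (by simp) 1 _ (by simp)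
  have r3 : PySem.Chars.replace [c] ['\\', '/'] ['/', '\\'] = [c] :=
    replace_singleton _ _ _ (by simp)
      (by intro h; have := h.length_le; simp at this)
  have r4 : PySem.Chars.replace [c] ['-', '>'] ['/', '\\'] = [c] :=
    replace_singleton _ _ _ (by simp)
      (by intro h; have := h.length_le; simp at this)
  have r5 : PySem.Chars.replace [c] ['~'] ['/', '\\'] = [c] :=
    replace_singleton _ _ _ (by simp)
      (by intro h
          rw [List.prefix_iff_eq_take] at h
          simp at h
          exact hc8 h.symm)
  rw [r1, r2, r3, r4, r5]
  have hred : redLoopGo [c].length [c] = [c] := by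
    have h1 : redLoopGo [c].length [c]
        = if findBinA [c] ['/', '\\'] = true then
            redLoopGo 0 (PySem.Chars.replace [c] ['(', 'A', '/', '\\', 'A', ')'] ['A'])
          else [c] := rfl
    rw [h1, if_neg (by simp [findBinA])]
  rw [hred, beq_eq_false_iff_ne]
  intro h
  exact hcA (by simpa using h)

theorem B_single_true (line : String) (c : Char) (hc : line.toList = [c])
    (hu : PySem.Chars.isupper c = true) :
    correction_check_alt line = true := by
  unfold correction_check_alt
  rw [hc]
  simp only [List.map_cons, List.map_nil, if_pos hu]
  have b1 : PySem.Chars.replace ['A'] pvPat4 ['A'] = ['A'] :=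
    replace_singleton _ _ _ (by simp [pvPat4])
      (by intro h; have := h.length_le; simp [pvPat4] at this)
  have b2 : PySem.Chars.replace ['A'] ['\\', '/'] ['/', '\\'] = ['A'] :=
    replace_singleton _ _ _ (by simp)
      (by intro h; have := h.length_le; simp at this)
  have b3 : PySem.Chars.replace ['A'] ['-', '>'] ['/', '\\'] = ['A'] :=
    replace_singleton _ _ _ (by simp)
      (by intro h; have := h.length_le; simp at this)
  have b4 : PySem.Chars.replace ['A'] ['~'] ['/', '\\'] = ['A'] :=
    replace_singleton _ _ _ (by simp)
      (by intro h
          rw [List.prefix_iff_eq_take] at h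
          simp at h)
  simp only [List.foldl_cons, List.foldl_nil]
  rw [show ['(', '!', 'A', ')'] = pvPat4 from rfl, b1, b2, b3, b4]
  have hst : List.foldl stepB [] ['A'] = ['A'] := by
    simp only [List.foldl_cons, List.foldl_nil]
    rw [stepB_ne [] 'A' (by decide)]
    rfl
  rw [hst]
  simp

theorem correction_check_changed : Claim_changed_correction_check := by
  unfold Claim_changed_correction_check
  refine ⟨by decide, by decide, ?_, ?_, by decide⟩
  · exact A_single_false pvDiffWitness_correction_check 'B' (by decide) (by decide) (by decide)
  · exact B_single_true pvDiffWitness_correction_check 'B' (by decide) (by decide)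

theorem correction_check_tight : Claim_exact_correction_check := by
  unfold Claim_exact_correction_check
  intro line _ hD
  obtain ⟨hlen, hall⟩ := hD
  obtain ⟨c, hc⟩ : ∃ c, line.toList = [c] := by
    cases h : line.toList with
    | nil => rw [h] at hlen; simp at hlen
    | cons a t =>
      rw [h] at hlen
      simp at hlen
      subst hlen
      exact ⟨a, rfl⟩
  rw [hc] at hall
  simp only [List.all_cons, List.all_nil, Bool.and_true, Bool.and_eq_true, bne_iff_ne] at hall
  obtain ⟨hu, hcA⟩ := hall
  rw [A_single_false line c hc hu hcA, B_single_true line c hc hu]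
  decide
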